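-- pv_equiv track=rewrite | github.com/reo11/AtCoder | atcoder/AGC/agc063/d.py | garner
-- ===== SOURCE A (Python) =====
-- def mod(a, m):
--     res = a % m
--     if res < 0:
--         res += m
--     return res
--
-- def extGCD(a, b, p=0, q=0):
--     if b == 0:
--         p = 1
--         q = 0
--         return a, p, q
--     d, q, p = extGCD(b, a%b)
--     q -= a // b * p
--     return d, p, q
--
-- def modinv(a, m):
--     d, x, y = extGCD(a, m)
--     return mod(x, m)  # 気持ち的には x % m だが、x が負かもしれないので
--
-- def garner(b, m, MOD):
--     m.append(MOD)  # 番兵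
--     coeffs = [1 for _ in range(len(m))]
--     constants = [0 for _ in range(len(m))]
--     for k in range(len(b)):
--         t = mod((b[k] - constants[k]) * modinv(coeffs[k], m[k]), m[k])
--         for i in range(k+1, len(m)):
--             constants[i] += t * coeffs[i]
--             constants[i] %= m[i]
--             coeffs[i] *= m[k]
--             coeffs[i] %= m[i]
--     return constants[-1]
-- ===== SOURCE B (Python) =====
-- def mod(a, m):
--     res = a % m
--     if res < 0:
--         res += m
--     return res
--
-- def extGCD(a, b, p=0, q=0):
--     if b == 0:
--         p = 1
--         q = 0
--         return a, p, q
--     d, q, p = extGCD(b, a%b)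
--     q -= a // b * p
--     return d, p, q
--
-- def modinv(a, m):
--     d, x, y = extGCD(a, m)
--     return mod(x, m)
--
-- def garner(b, m, MOD):
--     # mixed-radix digits first, then one Horner pass; same sentinel side effect on m
--     m.append(MOD)
--     n = len(b)
--     x = [0] * n
--     for k in range(n):
--         mk = m[k]
--         v = 0
--         p = 1
--         for j in range(k):
--             v = (v + x[j] * p) % mk
--             p = (p * m[j]) % mk
--         x[k] = mod((b[k] - v) * modinv(p, mk), mk)
--     res = 0
--     p = 1
--     for k in range(n):
--         res = (res + x[k] * p) % MOD
--         p = (p * m[k]) % MOD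
--     return res
-- ===== Notes on version B (the rewrite author's own statement) =====
-- stated objective: alternative
-- what changed: B computes the mixed-radix digits one at a time with a backward inner loop (recomputing the running product and partial value mod m[k]) into a single digit array and then evaluates the result in one separate Horner pass mod MOD, instead of A's forward scatter that maintains parallel coeffs/constants arrays updated at every later index.
-- outside the precondition, e.g. on garner([1, 2], [3], 5): A returns 1, B returns 2
import Mathlib
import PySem

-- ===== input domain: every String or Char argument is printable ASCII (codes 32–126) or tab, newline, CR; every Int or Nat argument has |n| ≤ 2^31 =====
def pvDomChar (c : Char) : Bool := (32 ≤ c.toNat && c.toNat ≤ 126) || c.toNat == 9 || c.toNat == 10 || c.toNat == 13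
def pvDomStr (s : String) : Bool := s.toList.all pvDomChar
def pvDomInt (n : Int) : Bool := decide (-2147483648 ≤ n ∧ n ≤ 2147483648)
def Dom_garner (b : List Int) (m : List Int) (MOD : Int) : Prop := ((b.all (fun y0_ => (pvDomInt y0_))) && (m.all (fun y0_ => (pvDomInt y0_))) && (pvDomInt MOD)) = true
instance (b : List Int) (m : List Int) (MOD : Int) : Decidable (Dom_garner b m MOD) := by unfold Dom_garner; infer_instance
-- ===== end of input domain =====

-- B restructures Garner's algorithm: mixed-radix digits are computed one at a time with a
-- backward-looking inner loop into a single digit array, then a separate Horner pass mod MOD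
-- gives the result (A instead scatters each digit forward into parallel coeffs/constants arrays).
-- Note: both A and B append MOD to the caller's list m (same observable side effect); the
-- equivalence proved here is about the return value.

-- ===== PORT A =====

-- termination measure for extGCD (cited by its decreasing_by)
theorem pymod_natAbs_lt (a b : Int) (h : b ≠ 0) : (PySem.Int.mod a b).natAbs < b.natAbs := by
  rcases lt_or_gt_of_ne h with hb | hb
  · have := PySem.Int.mod_neg_bounds a hb; omega
  · have h1 := PySem.Int.mod_nonneg a hb
    have h2 := PySem.Int.mod_lt a hb
    omega

-- port of the module helper `mod`
def modP (a m : Int) : Int :=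
  let res := PySem.Int.mod a m
  if res < 0 then res + m else res

-- port of `extGCD` (returns (d, p, q); the Python destructuring d,q,p = extGCD(...) swaps slots)
def extGCD (a b : Int) : Int × Int × Int :=
  if _h : b = 0 then (a, 1, 0)
  else
    let r := extGCD b (PySem.Int.mod a b)
    (r.1, r.2.2, r.2.1 - PySem.Int.floordiv a b * r.2.2)
termination_by b.natAbs
decreasing_by exact pymod_natAbs_lt a b _h

-- port of `modinv`
def modinv (a m : Int) : Int := modP (extGCD a m).2.1 m

def garner (b : List Int) (m : List Int) (MOD : Int) : Int :=
  let mm := m ++ [ MOD]            -- m.append(MOD)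
  let st := (List.range b.length).foldl (fun (st : List Int × List Int) k =>
      let mk := mm.getD k 0
      let t := modP ((b.getD k 0 - st.2.getD k 0) * modinv (st.1.getD k 0) mk) mk
      (List.range' (k+1) (mm.length - (k+1))).foldl (fun (st2 : List Int × List Int) i =>
          let mi := mm.getD i 0
          let cs' := st2.2.set i (PySem.Int.mod (st2.2.getD i 0 + t * st2.1.getD i 0) mi)
          let cf' := st2.1.set i (PySem.Int.mod (st2.1.getD i 0 * mk) mi)
          (cf', cs')) st)
    (List.replicate mm.length 1, List.replicate mm.length 0)
  (PySem.List.pyGet? st.2 (-1)).getD 0   -- constants[-1]; mm is never empty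

-- ===== PORT B =====

def garner_alt (b : List Int) (m : List Int) (MOD : Int) : Int :=
  let m2 := m ++ [ MOD]            -- m.append(MOD)
  let n := b.length
  let x := (List.range n).foldl (fun (x : List Int) k =>
      let mk := m2.getD k 0
      let vp := (List.range k).foldl (fun (vp : Int × Int) j =>
          (PySem.Int.mod (vp.1 + x.getD j 0 * vp.2) mk,
           PySem.Int.mod (vp.2 * m2.getD j 0) mk)) (0, 1)
      x.set k (modP ((b.getD k 0 - vp.1) * modinv vp.2 mk) mk)) (List.replicate n 0)
  let rp := (List.range n).foldl (fun (rp : Int × Int) k =>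
      (PySem.Int.mod (rp.1 + x.getD k 0 * rp.2) MOD,
       PySem.Int.mod (rp.2 * m2.getD k 0) MOD)) (0, 1)
  rp.1

-- ===== PRECONDITION & SPEC =====
-- Pre_ excludes the inputs where A raises (more than len(m)+1 residues: IndexError; a zero
-- modulus or MOD = 0 with nonempty b: ZeroDivisionError) and the degenerate sentinel-consuming
-- call len(b) = len(m)+1, where A silently treats the appended MOD as a modulus and discards the
-- last residue — a corner on which A's value is an accident of the sentinel and B's is as defensible.
def Pre_garner (b : List Int) (m : List Int) (MOD : Int) : Prop :=
  b.length ≤ m.length ∧ (b ≠ [] → (∀ v ∈ m, v ≠ 0) ∧ MOD ≠ 0)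
instance (b : List Int) (m : List Int) (MOD : Int) : Decidable (Pre_garner b m MOD) := by
  unfold Pre_garner; infer_instance

def pvWitness_garner : List Int × List Int × Int := ([2, 3], [3, 5], 7)

def Spec_garner (b : List Int) (m : List Int) (MOD : Int) (out : Int) : Prop := out = garner_alt b m MOD
instance (b : List Int) (m : List Int) (MOD : Int) (out : Int) : Decidable (Spec_garner b m MOD out) := by unfold Spec_garner; infer_instance

-- ===== CLAIM (what is proved, stated in full; the proofs are below) =====
def Claim_equal_garner : Prop := ∀ (b : List Int) (m : List Int) (MOD : Int), Dom_garner b m MOD → Pre_garner b m MOD → Spec_garner b m MOD (garner b m MOD)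

-- ===== LEMMAS AND PROOFS =====

-- closed forms both ports are reduced to:
-- Pfun mm md k = the running product of mm[0..k-1], reduced mod md at every step
def Pfun (mm : List Int) (md : Int) (k : ℕ) : Int :=
  (List.range k).foldl (fun p j => PySem.Int.mod (p * mm.getD j 0) md) 1

-- Cfun mm ds md k = the partial mixed-radix value of digits ds[0..k-1], reduced mod md at every step
def Cfun (mm ds : List Int) (md : Int) (k : ℕ) : Int :=
  (List.range k).foldl (fun c j => PySem.Int.mod (c + ds.getD j 0 * Pfun mm md j) md) 0

-- the mixed-radix digit list of Garner's algorithm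
def digs (b mm : List Int) : ℕ → List Int
  | 0 => []
  | k+1 => digs b mm k ++
      [modP ((b.getD k 0 - Cfun mm (digs b mm k) (mm.getD k 0) k) *
             modinv (Pfun mm (mm.getD k 0) k) (mm.getD k 0)) (mm.getD k 0)]

theorem length_digs (b mm : List Int) (k : ℕ) : (digs b mm k).length = k := by
  induction k with
  | zero => rfl
  | succ k ih => simp [digs, ih]

theorem pymod_zero (m : Int) : PySem.Int.mod 0 m = 0 := by simp [PySem.Int.mod]

theorem getD_set_int (l : List Int) (i j : ℕ) (v : Int) :
    (l.set i v).getD j 0 = if i = j ∧ i < l.length then v else l.getD j 0 := by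
  rw [List.getD_eq_getElem?_getD, List.getElem?_set]
  split_ifs with h1 h2 h3 <;> simp_all [List.getD_eq_getElem?_getD]
  omega

theorem getD_append_lt (l t : List Int) (j : ℕ) (h : j < l.length) :
    (l ++ t).getD j 0 = l.getD j 0 := by
  simp [List.getD_eq_getElem?_getD, List.getElem?_append_left h]

theorem getD_append_len (l : List Int) (v : Int) : (l ++ [v]).getD l.length 0 = v := by
  simp [List.getD_eq_getElem?_getD]

theorem Pfun_succ (mm : List Int) (md : Int) (k : ℕ) :
    Pfun mm md (k+1) = PySem.Int.mod (Pfun mm md k * mm.getD k 0) md := by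
  simp [Pfun, List.range_succ]

theorem Cfun_succ (mm ds : List Int) (md : Int) (k : ℕ) :
    Cfun mm ds md (k+1) = PySem.Int.mod (Cfun mm ds md k + ds.getD k 0 * Pfun mm md k) md := by
  simp [Cfun, List.range_succ]

theorem Cfun_congr (mm : List Int) (md : Int) (ds ds' : List Int) (k : ℕ)
    (h : ∀ j < k, ds.getD j 0 = ds'.getD j 0) : Cfun mm ds md k = Cfun mm ds' md k := by
  induction k with
  | zero => rfl
  | succ k ih =>
    rw [Cfun_succ, Cfun_succ, ih (fun j hj => h j (by omega)), h k (by omega)]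

theorem digs_prefix (b mm : List Int) (k k' : ℕ) (h : k ≤ k') :
    ∃ t, digs b mm k' = digs b mm k ++ t := by
  induction k' with
  | zero =>
    have hk0 : k = 0 := Nat.le_zero.mp h
    subst hk0; exact ⟨[], rfl⟩
  | succ k' ih =>
    rcases Nat.lt_or_ge k (k'+1) with hk | hk
    · obtain ⟨t, ht⟩ := ih (by omega)
      refine ⟨t ++ [modP ((b.getD k' 0 - Cfun mm (digs b mm k') (mm.getD k' 0) k') *
             modinv (Pfun mm (mm.getD k' 0) k') (mm.getD k' 0)) (mm.getD k' 0)], ?_⟩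
      conv_lhs => rw [digs]
      rw [ht, List.append_assoc]
    · have hkk : k = k' + 1 := by omega
      subst hkk; exact ⟨[], by simp⟩

theorem digs_getD (b mm : List Int) (j k k' : ℕ) (hj : j < k) (h : k ≤ k') :
    (digs b mm k').getD j 0 = (digs b mm k).getD j 0 := by
  obtain ⟨t, ht⟩ := digs_prefix b mm k k' h
  rw [ht, getD_append_lt]
  rw [length_digs]; omega

theorem digs_last (b mm : List Int) (k : ℕ) :
    (digs b mm (k+1)).getD k 0 =
      modP ((b.getD k 0 - Cfun mm (digs b mm k) (mm.getD k 0) k) *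
            modinv (Pfun mm (mm.getD k 0) k) (mm.getD k 0)) (mm.getD k 0) := by
  show (digs b mm k ++ [_]).getD k 0 = _
  have h := getD_append_len (digs b mm k)
    (modP ((b.getD k 0 - Cfun mm (digs b mm k) (mm.getD k 0) k) *
           modinv (Pfun mm (mm.getD k 0) k) (mm.getD k 0)) (mm.getD k 0))
  rwa [length_digs] at h

-- B's inner pair loop computes (Cfun, Pfun)
theorem pair_fold (mm ds : List Int) (md : Int) (c : ℕ) :
    (List.range c).foldl (fun (vp : Int × Int) j =>
        (PySem.Int.mod (vp.1 + ds.getD j 0 * vp.2) md,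
         PySem.Int.mod (vp.2 * mm.getD j 0) md)) (0, 1)
      = (Cfun mm ds md c, Pfun mm md c) := by
  induction c with
  | zero => rfl
  | succ c ih => rw [List.range_succ, List.foldl_append, ih]; simp [Cfun_succ, Pfun_succ]

-- A's inner scatter loop, characterized pointwise
theorem inner_char (mm : List Int) (t mk : Int) (c : ℕ) :
    ∀ (s : ℕ) (st0 : List Int × List Int), st0.1.length = st0.2.length →
      (((List.range' s c).foldl (fun (st2 : List Int × List Int) i =>
          let mi := mm.getD i 0
          let cs' := st2.2.set i (PySem.Int.mod (st2.2.getD i 0 + t * st2.1.getD i 0) mi)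
          let cf' := st2.1.set i (PySem.Int.mod (st2.1.getD i 0 * mk) mi)
          (cf', cs')) st0).1.length = st0.1.length) ∧
      (((List.range' s c).foldl (fun (st2 : List Int × List Int) i =>
          let mi := mm.getD i 0
          let cs' := st2.2.set i (PySem.Int.mod (st2.2.getD i 0 + t * st2.1.getD i 0) mi)
          let cf' := st2.1.set i (PySem.Int.mod (st2.1.getD i 0 * mk) mi)
          (cf', cs')) st0).2.length = st0.2.length) ∧
      (∀ i, ((List.range' s c).foldl (fun (st2 : List Int × List Int) i =>
          let mi := mm.getD i 0
          let cs' := st2.2.set i (PySem.Int.mod (st2.2.getD i 0 + t * st2.1.getD i 0) mi)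
          let cf' := st2.1.set i (PySem.Int.mod (st2.1.getD i 0 * mk) mi)
          (cf', cs')) st0).1.getD i 0 =
        if s ≤ i ∧ i < s + c then PySem.Int.mod (st0.1.getD i 0 * mk) (mm.getD i 0) else st0.1.getD i 0) ∧
      (∀ i, ((List.range' s c).foldl (fun (st2 : List Int × List Int) i =>
          let mi := mm.getD i 0
          let cs' := st2.2.set i (PySem.Int.mod (st2.2.getD i 0 + t * st2.1.getD i 0) mi)
          let cf' := st2.1.set i (PySem.Int.mod (st2.1.getD i 0 * mk) mi)
          (cf', cs')) st0).2.getD i 0 =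
        if s ≤ i ∧ i < s + c then PySem.Int.mod (st0.2.getD i 0 + t * st0.1.getD i 0) (mm.getD i 0) else st0.2.getD i 0) := by
  induction c with
  | zero =>
    intro s st0 hcl
    refine ⟨rfl, rfl, fun i => ?_, fun i => ?_⟩ <;> simp
  | succ c ih =>
    intro s st0 hcl
    rw [List.range'_succ]
    simp only [List.foldl_cons]
    obtain ⟨hl1, hl2, h1, h2⟩ := ih (s+1)
      (st0.1.set s (PySem.Int.mod (st0.1.getD s 0 * mk) (mm.getD s 0)),
       st0.2.set s (PySem.Int.mod (st0.2.getD s 0 + t * st0.1.getD s 0) (mm.getD s 0)))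
      (by simp [hcl])
    simp only at hl1 hl2 h1 h2
    refine ⟨by rw [hl1]; simp, by rw [hl2]; simp, fun i => ?_, fun i => ?_⟩
    · rw [h1 i, getD_set_int]
      by_cases hsi : s = i
      · subst hsi
        have hf : ¬ (s+1 ≤ s ∧ s < s+1+c) := by omega
        have ht2 : s ≤ s ∧ s < s + (c+1) := by omega
        rw [if_neg hf, if_pos ht2]
        by_cases hlen : s < st0.1.length
        · simp [hlen]
        · simp [hlen, pymod_zero]
      · rw [if_neg (show ¬(s = i ∧ s < st0.1.length) from fun hc => hsi hc.1)]
        split_ifs <;> first | rfl | omega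
    · rw [h2 i, getD_set_int, getD_set_int]
      by_cases hsi : s = i
      · subst hsi
        have hf : ¬ (s+1 ≤ s ∧ s < s+1+c) := by omega
        have ht2 : s ≤ s ∧ s < s + (c+1) := by omega
        rw [if_neg hf, if_pos ht2]
        by_cases hlen : s < st0.2.length
        · have hlen' : s < st0.1.length := by omega
          simp [hlen, hlen']
        · have hlen' : ¬ s < st0.1.length := by omega
          simp [hlen, hlen', pymod_zero]
      · rw [if_neg (show ¬(s = i ∧ s < st0.2.length) from fun hc => hsi hc.1),
             if_neg (show ¬(s = i ∧ s < st0.1.length) from fun hc => hsi hc.1)]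
        split_ifs <;> first | rfl | omega

-- A's outer loop invariant
theorem A_inv (b m : List Int) (MOD : Int) (hb : b.length ≤ m.length) (k : ℕ) (hk : k ≤ b.length) :
    let mm := m ++ [ MOD]
    let st := (List.range k).foldl (fun (st : List Int × List Int) k =>
      let mk := mm.getD k 0
      let t := modP ((b.getD k 0 - st.2.getD k 0) * modinv (st.1.getD k 0) mk) mk
      (List.range' (k+1) (mm.length - (k+1))).foldl (fun (st2 : List Int × List Int) i =>
          let mi := mm.getD i 0
          let cs' := st2.2.set i (PySem.Int.mod (st2.2.getD i 0 + t * st2.1.getD i 0) mi)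
          let cf' := st2.1.set i (PySem.Int.mod (st2.1.getD i 0 * mk) mi)
          (cf', cs')) st)
      (List.replicate mm.length 1, List.replicate mm.length 0)
    st.1.length = mm.length ∧ st.2.length = mm.length ∧
    (∀ i < mm.length, st.1.getD i 0 = Pfun mm (mm.getD i 0) (min k i) ∧
      st.2.getD i 0 = Cfun mm (digs b mm k) (mm.getD i 0) (min k i)) := by
  intro mm
  induction k with
  | zero =>
    refine ⟨by simp, by simp, fun i hi => ⟨?_, ?_⟩⟩ <;>
      simp [Pfun, Cfun, List.getD_eq_getElem?_getD, hi]
  | succ k ih =>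
    have hk' : k ≤ b.length := by omega
    obtain ⟨hl1, hl2, hinv⟩ := ih hk'
    rw [List.range_succ, List.foldl_append]
    simp only [List.foldl_cons, List.foldl_nil]
    have hkm : k < mm.length := by simp [mm]; omega
    obtain ⟨hPk, hCk⟩ := hinv k hkm
    simp only [Nat.min_self] at hPk hCk
    rw [hPk, hCk]
    obtain ⟨gl1, gl2, g1, g2⟩ := inner_char mm
      (modP ((b.getD k 0 - Cfun mm (digs b mm k) (mm.getD k 0) k) *
             modinv (Pfun mm (mm.getD k 0) k) (mm.getD k 0)) (mm.getD k 0))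
      (mm.getD k 0) (mm.length - (k+1)) (k+1) _ (by rw [hl1, hl2])
    refine ⟨by rw [gl1, hl1], by rw [gl2, hl2], fun i hi => ?_⟩
    obtain ⟨hPi, hCi⟩ := hinv i hi
    constructor
    · rw [g1 i, hPi]
      by_cases hik : k + 1 ≤ i
      · have hin : k + 1 ≤ i ∧ i < k + 1 + (mm.length - (k+1)) := by omega
        rw [if_pos hin]
        have e1 : min k i = k := by omega
        have e2 : min (k+1) i = k + 1 := by omega
        rw [e1, e2, Pfun_succ]
      · have hin : ¬ (k + 1 ≤ i ∧ i < k + 1 + (mm.length - (k+1))) := by omega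
        rw [if_neg hin]
        congr 1; omega
    · rw [g2 i, hCi, hPi]
      by_cases hik : k + 1 ≤ i
      · have hin : k + 1 ≤ i ∧ i < k + 1 + (mm.length - (k+1)):= by omega
        rw [if_pos hin]
        have e1 : min k i = k := by omega
        have e2 : min (k+1) i = k + 1 := by omega
        rw [e1, e2, Cfun_succ]
        rw [Cfun_congr mm (mm.getD i 0) (digs b mm (k+1)) (digs b mm k) k
              (fun j hj => digs_getD b mm j k (k+1) hj (by omega))]
        rw [digs_last]
      · have hin : ¬ (k + 1 ≤ i ∧ i < k + 1 + (mm.length - (k+1))) := by omega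
        rw [if_neg hin]
        have e12 : min (k+1) i = min k i := by omega
        rw [e12]
        exact Cfun_congr mm _ _ _ _ (fun j hj => (digs_getD b mm j k (k+1) (by omega) (by omega)).symm)

theorem set_digit (l : List Int) (r : ℕ) (hr : 0 < r) (d : Int) :
    (l ++ List.replicate r (0:Int)).set l.length d = (l ++ [d]) ++ List.replicate (r-1) 0 := by
  rw [List.set_append]
  rw [if_neg (lt_irrefl l.length), Nat.sub_self]
  cases r with
  | zero => omega
  | succ r' => rw [List.replicate_succ, List.set_cons_zero, List.append_assoc]; rfl

-- B's digit-building loop produces exactly `digs` (padded with the untouched zeros)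
theorem B_inv (b m : List Int) (MOD : Int) (k : ℕ) (hk : k ≤ b.length) :
    let m2 := m ++ [ MOD]
    (List.range k).foldl (fun (x : List Int) k =>
      let mk := m2.getD k 0
      let vp := (List.range k).foldl (fun (vp : Int × Int) j =>
          (PySem.Int.mod (vp.1 + x.getD j 0 * vp.2) mk,
           PySem.Int.mod (vp.2 * m2.getD j 0) mk)) (0, 1)
      x.set k (modP ((b.getD k 0 - vp.1) * modinv vp.2 mk) mk)) (List.replicate b.length 0)
    = digs b m2 k ++ List.replicate (b.length - k) 0 := by
  intro m2
  induction k with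
  | zero => simp [digs]
  | succ k ih =>
    have hk' : k ≤ b.length := by omega
    rw [List.range_succ, List.foldl_append]
    simp only [List.foldl_cons, List.foldl_nil]
    rw [ih hk']
    have hx : ∀ j < k, (digs b m2 k ++ List.replicate (b.length - k) 0).getD j 0
        = (digs b m2 k).getD j 0 := by
      intro j hj; exact getD_append_lt _ _ j (by rw [length_digs]; omega)
    have hpair : (List.range k).foldl (fun (vp : Int × Int) j =>
          (PySem.Int.mod (vp.1 + (digs b m2 k ++ List.replicate (b.length - k) 0).getD j 0 * vp.2) (m2.getD k 0),
           PySem.Int.mod (vp.2 * m2.getD j 0) (m2.getD k 0))) (0, 1)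
        = (Cfun m2 (digs b m2 k) (m2.getD k 0) k, Pfun m2 (m2.getD k 0) k) := by
      rw [pair_fold]
      congr 1
      exact Cfun_congr _ _ _ _ _ hx
    rw [hpair]
    have hsd := set_digit (digs b m2 k) (b.length - k) (by omega)
      (modP ((b.getD k 0 - Cfun m2 (digs b m2 k) (m2.getD k 0) k) *
             modinv (Pfun m2 (m2.getD k 0) k) (m2.getD k 0)) (m2.getD k 0))
    rw [length_digs] at hsd
    rw [hsd, show b.length - k - 1 = b.length - (k+1) from by omega]
    rfl

theorem pyGet_neg_one (l : List Int) (h : l ≠ []) :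
    (PySem.List.pyGet? l (-1)).getD 0 = l.getD (l.length - 1) 0 := by
  have : 1 ≤ l.length := List.length_pos_iff.mpr h
  simp [PySem.List.pyGet?, PySem.List.pyIdx?, this, List.getD_eq_getElem?_getD]

-- ===== VERDICT (by name: the statement is the Claim_ definition above) =====
theorem garner_spec : Claim_equal_garner := by
  intro b m MOD _ hpre
  obtain ⟨hb, -⟩ := hpre
  show garner b m MOD = garner_alt b m MOD
  have hA := A_inv b m MOD hb b.length le_rfl
  have hB := B_inv b m MOD b.length le_rfl
  simp only at hA hB
  obtain ⟨hl1, hl2, hinv⟩ := hA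
  unfold garner garner_alt
  simp only
  rw [hB]
  simp only [Nat.sub_self, List.replicate_zero, List.append_nil]
  rw [pair_fold]
  rw [pyGet_neg_one _ (by intro hnil; rw [hnil] at hl2; simp at hl2)]
  rw [hl2]
  have hlt : (m ++ [ MOD]).length - 1 < (m ++ [ MOD]).length := by simp
  obtain ⟨-, hC⟩ := hinv _ hlt
  rw [hC]
  have hL : (m ++ [ MOD]).length - 1 = m.length := by simp
  rw [hL, getD_append_len]
  have hmin : min b.length m.length = b.length := by omega
  rw [hmin]
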